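-- pv_equiv track=rewrite | github.com/kachyna/AOC_2025 | 2_ranges/script.py | numberIsInvalid
-- ===== SOURCE A (Python) =====
-- def numberIsInvalid( x, sub_len ) :
--     substringToMatch = x[:sub_len]
--     idx_l = 0
--     idx_r = sub_len
--
--     while idx_r <= len(x) :
--         if substringToMatch != x[idx_l:idx_r] : return False
--         else :
--             idx_l = idx_r
--             idx_r += sub_len
--     return True
-- ===== SOURCE B (Python) =====
-- def numberIsInvalid(x, sub_len):
--     prefix = x[:sub_len]
--     count = len(x) // sub_len
--     return x[:count * sub_len] == prefix * count
-- ===== Notes on version B (the rewrite author's own statement) =====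
-- stated objective: idiomatic
-- what changed: Replaces the block-by-block while loop with a closed-form check: compute the number of full blocks up front and compare the full-block portion of x against the prefix repeated that many times in one string comparison.
-- outside the precondition, e.g. on numberIsInvalid('ab', -1): A returns False, B returns False; on numberIsInvalid('x', 0): A does not finish within the time limit, B raises ZeroDivisionError
import Mathlib
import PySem

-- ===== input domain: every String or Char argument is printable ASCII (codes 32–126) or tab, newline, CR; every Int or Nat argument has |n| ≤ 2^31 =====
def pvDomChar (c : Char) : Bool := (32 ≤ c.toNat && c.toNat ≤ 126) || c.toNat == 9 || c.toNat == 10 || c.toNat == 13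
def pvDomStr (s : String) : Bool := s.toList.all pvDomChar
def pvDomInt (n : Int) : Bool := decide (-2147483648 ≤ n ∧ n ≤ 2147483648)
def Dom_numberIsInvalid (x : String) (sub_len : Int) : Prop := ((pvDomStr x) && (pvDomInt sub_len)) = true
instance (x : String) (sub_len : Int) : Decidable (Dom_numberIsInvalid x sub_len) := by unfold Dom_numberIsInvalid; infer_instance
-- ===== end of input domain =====

-- B replaces A's block-by-block while loop with one closed-form comparison of the
-- full-block portion of x against the prefix repeated count times (idiomatic, same cost).


-- ===== PORT A =====
-- the while loop; the '1 ≤ sub' conjunct in the guard only makes the recursion total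
-- in Lean (Python diverges for sub_len = 0 and can loop for negative sub_len; all of
-- sub_len ≤ 0 is outside Pre_numberIsInvalid)
def numberIsInvalidLoop (s : List Char) (sub : Int) (pref : List Char) (idx_l idx_r : Int) : Bool :=
  if _h : idx_r ≤ (s.length : Int) ∧ 1 ≤ sub then
    if pref ≠ PySem.List.slice s (some idx_l) (some idx_r) then false
    else numberIsInvalidLoop s sub pref idx_r (idx_r + sub)
  else true
termination_by ((s.length : Int) + 1 - idx_r).toNat
decreasing_by omega

def numberIsInvalid (x : String) (sub_len : Int) : Bool :=
  let s := x.toList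
  let substringToMatch := PySem.List.slice s none (some sub_len)
  numberIsInvalidLoop s sub_len substringToMatch 0 sub_len

-- ===== PORT B =====
def numberIsInvalid_alt (x : String) (sub_len : Int) : Bool :=
  let s := x.toList
  let prefix_ := PySem.List.slice s none (some sub_len)
  let count := PySem.Int.floordiv (s.length : Int) sub_len
  decide (PySem.List.slice s none (some (count * sub_len)) = PySem.List.pyRepeat prefix_ count)

-- ===== PRECONDITION & SPEC =====
-- Pre_ excludes sub_len ≤ 0: Python A diverges there for sub_len = 0 (and for negative
-- sub_len on strings of length ≤ 1), B raises ZeroDivisionError at sub_len = 0, and the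
-- remaining negative-sub_len behaviour is an accident of Python's negative slicing.
def Pre_numberIsInvalid (x : String) (sub_len : Int) : Prop := 1 ≤ sub_len
instance (x : String) (sub_len : Int) : Decidable (Pre_numberIsInvalid x sub_len) := by unfold Pre_numberIsInvalid; infer_instance
def pvWitness_numberIsInvalid : String × Int := ("abab", 2)

def Spec_numberIsInvalid (x : String) (sub_len : Int) (out : Bool) : Prop := out = numberIsInvalid_alt x sub_len
instance (x : String) (sub_len : Int) (out : Bool) : Decidable (Spec_numberIsInvalid x sub_len out) := by unfold Spec_numberIsInvalid; infer_instance

-- ===== CLAIM (what is proved, stated in full; the proofs are below) =====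
def Claim_equal_numberIsInvalid : Prop := ∀ (x : String) (sub_len : Int), Dom_numberIsInvalid x sub_len → Pre_numberIsInvalid x sub_len → Spec_numberIsInvalid x sub_len (numberIsInvalid x sub_len)

-- ===== LEMMAS AND PROOFS =====

-- proof-side characterisation of A's loop: check block after block of `rest`
def chk (pref : List Char) (m : Nat) (rest : List Char) : Bool :=
  if _h : 1 ≤ m ∧ m ≤ rest.length then
    if pref = rest.take m then chk pref m (rest.drop m) else false
  else true
termination_by rest.length
decreasing_by simp; omega

lemma loop_eq_chk (s : List Char) (m : Nat) (hm : 1 ≤ m) (pref : List Char) :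
    ∀ (k l : Nat), s.length ≤ l + k →
      numberIsInvalidLoop s (m : Int) pref (l : Int) ((l : Int) + (m : Int)) = chk pref m (s.drop l) := by
  intro k
  induction k with
  | zero =>
    intro l hl
    rw [numberIsInvalidLoop, chk]
    rw [dif_neg (by omega), dif_neg (by simp only [List.length_drop]; omega)]
  | succ k ih =>
    intro l hl
    rw [numberIsInvalidLoop, chk]
    by_cases hg : l + m ≤ s.length
    · rw [dif_pos (by omega), dif_pos (by simp only [List.length_drop]; omega)]
      rw [PySem.List.slice_natCast_add]
      by_cases he : pref = List.take m (List.drop l s)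
      · rw [if_neg (by simpa using he), if_pos he]
        have hcast : (l : Int) + (m : Int) = ((l + m : Nat) : Int) := by push_cast; ring
        rw [hcast, ih (l + m) (by omega), List.drop_drop]
      · rw [if_pos (by simpa using he), if_neg he]
    · rw [dif_neg (by omega), dif_neg (by simp only [List.length_drop]; omega)]

lemma chk_eq_closed (pref : List Char) (m : Nat) (hm : 1 ≤ m) (hp : pref.length = m) :
    ∀ (rest : List Char),
      chk pref m rest =
        decide (rest.take ((rest.length / m) * m) = (List.replicate (rest.length / m) pref).flatten) := by
  intro rest
  fun_induction chk pref m rest with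
  | case1 rest h he ih =>
    have hc : rest.length / m = (rest.drop m).length / m + 1 := by
      rw [List.length_drop, Nat.div_eq_sub_div (by omega) h.2]
    rw [ih, hc]
    have hsplit : rest.take (((rest.drop m).length / m + 1) * m)
        = rest.take m ++ (rest.drop m).take (((rest.drop m).length / m) * m) := by
      have : ((rest.drop m).length / m + 1) * m = m + ((rest.drop m).length / m) * m := by ring
      rw [this, List.take_add]
    rw [hsplit, List.replicate_succ, List.flatten_cons]
    have : rest.take m = pref := he.symm
    rw [this]
    simp only [decide_eq_decide]
    simp
  | case2 rest h he =>
    have hc : 1 ≤ rest.length / m := Nat.one_le_div_iff (by omega) |>.mpr h.2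
    symm
    simp only [decide_eq_false_iff_not]
    intro habs
    apply he
    have h1 : (rest.take ((rest.length / m) * m)).take m = rest.take m := by
      rw [List.take_take]; congr 1
      exact Nat.min_eq_left (Nat.le_mul_of_pos_left m hc)
    have h2 : ((List.replicate (rest.length / m) pref).flatten).take m = pref := by
      obtain ⟨c, hcc⟩ : ∃ c, rest.length / m = c + 1 := ⟨rest.length / m - 1, by omega⟩
      rw [hcc, List.replicate_succ, List.flatten_cons, List.take_left' hp]
    rw [← h1, habs, h2]
  | case3 rest h =>
    have : rest.length < m := by omega
    rw [Nat.div_eq_of_lt this]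
    simp

-- ===== VERDICT (by name: the statement is the Claim_ definition above) =====
theorem numberIsInvalid_spec : Claim_equal_numberIsInvalid := by
  intro x sub_len _ hpre
  unfold Spec_numberIsInvalid numberIsInvalid numberIsInvalid_alt
  have hpre' : (1 : Int) ≤ sub_len := hpre
  set s := x.toList with hs
  obtain ⟨m, hm, rfl⟩ : ∃ m : Nat, 1 ≤ m ∧ sub_len = (m : Int) :=
    ⟨sub_len.toNat, by omega, by omega⟩
  simp only
  rw [PySem.List.slice_to_natCast s m]
  have hA : numberIsInvalidLoop s (m : Int) (s.take m) 0 (m : Int) = chk (s.take m) m s := by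
    have h := loop_eq_chk s m hm (s.take m) s.length 0 (by omega)
    simpa using h
  rw [hA]
  rw [PySem.Int.floordiv_natCast s.length m]
  have hmul : ((s.length / m : Nat) : Int) * (m : Int) = ((s.length / m * m : Nat) : Int) := by
    push_cast; ring
  rw [hmul, PySem.List.slice_to_natCast]
  by_cases hlen : m ≤ s.length
  · rw [chk_eq_closed (s.take m) m hm (by simp; omega) s]
    simp [PySem.List.pyRepeat]
    norm_cast
  · rw [chk, dif_neg (by omega)]
    have : s.length / m = 0 := Nat.div_eq_of_lt (by omega)
    rw [this]
    simp [PySem.List.pyRepeat]
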